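-- pv_equiv track=rewrite | github.com/BLooperZ/nutcracker | src/nutcracker/sputm/windex_v6.py | break_lines
-- ===== SOURCE A (Python) =====
-- def break_lines(asts):
--     for _, seq in asts.items():
--         stats = iter(list(seq))
--         seq.clear()
--         last_line = []
--         for st in stats:
--             if last_line:
--                 if not (isinstance(st, str) and st.startswith('\t')):
--                     if len(last_line) > 1:
--                         assert all(isinstance(part, str) for part in last_line), repr(last_line)
--                         term = last_line.pop() + '\n'
--                         last_line = [x + ' \\' for x in last_line] + [term]
--                     seq.extend(last_line)
--                     last_line.clear()
--             last_line.append(st)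
--         if last_line:
--             if len(last_line) > 1:
--                 assert all(isinstance(part, str) for part in last_line), repr(last_line)
--                 term = last_line.pop() + '\n'
--                 last_line = [x + ' \\' for x in last_line] + [term]
--             seq.extend(last_line)
--     return asts
-- ===== SOURCE B (Python) =====
-- def break_lines(asts):
--     for _, seq in asts.items():
--         prevs = [None] + seq[:-1]
--         nxts = seq[1:] + [None]
--         new = []
--         for prev, st, nxt in zip(prevs, seq, nxts):
--             if isinstance(nxt, str) and nxt.startswith('\t'):
--                 new.append(st + ' \\')
--             elif prev is not None and isinstance(st, str) and st.startswith('\t'):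
--                 new.append(st + '\n')
--             else:
--                 new.append(st)
--         seq[:] = new
--     return asts
-- ===== Notes on version B (the rewrite author's own statement) =====
-- stated objective: simpler
-- what changed: A maintains a pending last_line group in a stateful loop and rewrites the whole group at each flush (and once more after the loop); B removes the group state entirely: it zips each statement with None-padded shifted copies of the list (predecessor and successor) and classifies every statement locally - successor is a tab-continuation: append ' \', statement itself a continuation with a predecessor: append newline, else unchanged.
import Mathlib
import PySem

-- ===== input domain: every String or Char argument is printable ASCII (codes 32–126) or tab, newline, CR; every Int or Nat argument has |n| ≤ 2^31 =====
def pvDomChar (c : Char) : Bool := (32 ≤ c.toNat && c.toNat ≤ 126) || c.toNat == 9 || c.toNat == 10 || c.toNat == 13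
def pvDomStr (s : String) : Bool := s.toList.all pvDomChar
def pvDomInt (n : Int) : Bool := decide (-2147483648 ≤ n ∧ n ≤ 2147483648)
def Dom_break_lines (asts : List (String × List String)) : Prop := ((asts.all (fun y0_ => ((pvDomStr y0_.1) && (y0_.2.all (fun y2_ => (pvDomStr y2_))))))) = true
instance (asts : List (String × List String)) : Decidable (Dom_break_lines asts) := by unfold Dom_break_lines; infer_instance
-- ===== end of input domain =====

-- B replaces A's stateful group-and-flush loop by a stateless neighbour-window map
-- (each statement is classified from its predecessor/successor alone); objective: simpler.
-- Both programs mutate each seq in place in Python; the equivalence proved here is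
-- about the returned value (which contains the same rebuilt lists).

-- ===== PORT A =====
-- A's inner loop: state = (seq so far, last_line); elements are all str on this
-- domain, so the isinstance checks are True and the asserts always pass.
def pvStepA (s : List String × List String) (st : String) : List String × List String :=
  let (seq, last_line) := s
  if last_line ≠ [] ∧ ¬ (PySem.Str.startswith st "\t") then
    -- flush: pop the terminator, decorate the rest ('last_line.pop()' = getLast!/dropLast)
    let last' := if last_line.length > 1 then
        (last_line.dropLast.map (fun x => x ++ " \\")) ++ [last_line.getLast! ++ "\n"]
      else last_line
    (seq ++ last', [st])
  else (seq, last_line ++ [st])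

def pvSeqA (seq : List String) : List String :=
  let r := seq.foldl pvStepA ([], [])
  if r.2 ≠ [] then
    r.1 ++ (if r.2.length > 1 then
        (r.2.dropLast.map (fun x => x ++ " \\")) ++ [r.2.getLast! ++ "\n"]
      else r.2)
  else r.1

def break_lines (asts : List (String × List String)) : List (String × List String) :=
  asts.map (fun p => (p.1, pvSeqA p.2))

-- ===== PORT B =====
-- B: zip each statement with its neighbours (None-padded shifted copies, 'seq[:-1]'
-- and 'seq[1:]' as slices) and classify it locally: successor continues → ' \',
-- itself a continuation with a predecessor → '\n', else unchanged.
def pvMark (p : Option String × String × Option String) : String :=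
  match p with
  | (prev, st, nxt) =>
    if (match nxt with | some s => PySem.Str.startswith s "\t" | none => false) then st ++ " \\"
    else if prev.isSome && PySem.Str.startswith st "\t" then st ++ "\n"
    else st

def pvSeqB (seq : List String) : List String :=
  let prevs : List (Option String) := none :: (PySem.List.slice seq none (some (-1))).map some
  let nxts : List (Option String) := (PySem.List.slice seq (some 1) none).map some ++ [none]
  (prevs.zip (seq.zip nxts)).map pvMark

def break_lines_alt (asts : List (String × List String)) : List (String × List String) :=
  asts.map (fun p => (p.1, pvSeqB p.2))

-- ===== PRECONDITION & SPEC =====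
def Spec_break_lines (asts : List (String × List String)) (out : List (String × List String)) : Prop := out = break_lines_alt asts
instance (asts : List (String × List String)) (out : List (String × List String)) : Decidable (Spec_break_lines asts out) := by unfold Spec_break_lines; infer_instance

-- ===== CLAIM =====
def Claim_equal_break_lines : Prop := ∀ (asts : List (String × List String)), Dom_break_lines asts → Spec_break_lines asts (break_lines asts)

-- ===== LEMMAS AND PROOFS =====

-- common specification: gSpec b xs renders xs where b says "the head has a predecessor"
def tabC (s : String) : Bool := PySem.Str.startswith s "\t"

def gSpec : Bool → List String → List String
  | _, [] => []
  | b, [x] => [if b && tabC x then x ++ "\n" else x]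
  | b, x :: y :: xs =>
      (if tabC y then x ++ " \\" else if b && tabC x then x ++ "\n" else x) :: gSpec true (y :: xs)

-- A-side: flush of a pending group, and A's loop as a two-argument recursion
def flushA (cur : List String) : List String :=
  if cur.length > 1 then (cur.dropLast.map (fun x => x ++ " \\")) ++ [cur.getLast! ++ "\n"] else cur

def hA : List String → List String → List String
  | cur, [] => flushA cur
  | cur, x :: xs =>
      if cur ≠ [] ∧ ¬ tabC x then flushA cur ++ hA [x] xs else hA (cur ++ [x]) xs

def finA (r : List String × List String) : List String :=
  if r.2 ≠ [] then
    r.1 ++ (if r.2.length > 1 then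
        (r.2.dropLast.map (fun x => x ++ " \\")) ++ [r.2.getLast! ++ "\n"]
      else r.2)
  else r.1

lemma finA_foldl (xs : List String) (out cur : List String) :
    finA (xs.foldl pvStepA (out, cur)) = out ++ hA cur xs := by
  induction xs generalizing out cur with
  | nil =>
    by_cases h : cur = [] <;> simp [finA, hA, flushA, h]
  | cons x xs ih =>
    simp only [List.foldl_cons, pvStepA, hA, tabC]
    by_cases h : cur ≠ [] ∧ ¬ (PySem.Str.startswith x "\t") = true
    · simp only [if_pos h]
      rw [ih]
      simp [flushA, List.append_assoc]
    · simp only [if_neg h]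
      exact ih out (cur ++ [x])

lemma flushA_concat (cur : List String) (x : String) (h : cur ≠ []) :
    flushA (cur ++ [x]) = cur.map (fun s => s ++ " \\") ++ [x ++ "\n"] := by
  unfold flushA
  have hl : (cur ++ [x]).length > 1 := by
    cases cur with | nil => exact absurd rfl h | cons a t => simp
  rw [if_pos hl, List.dropLast_concat, List.getLast!_eq_getLast?_getD, List.getLast?_concat]
  rfl

-- the partial rendering of the pending group, given what follows
def partA (cur : List String) : List String → List String
  | [] => flushA cur
  | x :: _ => if tabC x then cur.map (fun s => s ++ " \\") else flushA cur

lemma hA_partA (xs : List String) (cur : List String) (h : cur ≠ []) :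
    hA cur xs = partA cur xs ++ gSpec true xs := by
  induction xs generalizing cur with
  | nil => simp [hA, partA, gSpec]
  | cons x xs ih =>
    by_cases hx : tabC x
    · have hc : ¬ (cur ≠ [] ∧ ¬ tabC x = true) := by simp [hx]
      rw [hA, if_neg hc, ih (cur ++ [x]) (by simp)]
      cases xs with
      | nil =>
        simp [partA, gSpec, hx, flushA_concat cur x h]
      | cons y tl =>
        by_cases hy : tabC y
        · simp [partA, gSpec, hx, hy, List.map_append]
        · simp [partA, gSpec, hx, hy, flushA_concat cur x h]
    · have hc : (cur ≠ [] ∧ ¬ tabC x = true) := ⟨h, by simp [hx]⟩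
      rw [hA, if_pos hc, ih [x] (by simp)]
      cases xs with
      | nil => simp [partA, gSpec, hx, flushA]
      | cons y tl =>
        simp only [partA, gSpec, hx]
        by_cases hy : tabC y <;> simp [hy, flushA]

lemma hA_nil_gSpec (xs : List String) : hA [] xs = gSpec false xs := by
  cases xs with
  | nil => simp [hA, flushA, gSpec]
  | cons x xs =>
    rw [hA, if_neg (by simp), List.nil_append, hA_partA xs [x] (by simp)]
    cases xs with
    | nil => simp [partA, gSpec, flushA]
    | cons y tl =>
      simp only [partA, gSpec]
      by_cases hy : tabC y <;> simp [hy, flushA]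

lemma seqA_gSpec (seq : List String) : pvSeqA seq = gSpec false seq := by
  have h := finA_foldl seq [] []
  simpa [pvSeqA, finA, hA_nil_gSpec] using h

-- B-side: the zipped neighbour map equals gSpec, with the previous element as parameter
lemma zip_mark_gSpec (xs : List String) (p : Option String) :
    ((p :: xs.dropLast.map some).zip (xs.zip ((xs.drop 1).map some ++ [none]))).map pvMark
      = gSpec p.isSome xs := by
  induction xs generalizing p with
  | nil => simp [gSpec]
  | cons x xs ih =>
    cases xs with
    | nil =>
      simp [gSpec, pvMark, tabC]
    | cons y tl =>
      have ihy := ih (p := some x)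
      rw [show (((p :: ((x :: y :: tl).dropLast.map some)).zip
            ((x :: y :: tl).zip ((((x :: y :: tl).drop 1).map some) ++ [none]))).map pvMark)
          = pvMark (p, x, some y) ::
            (((some x :: ((y :: tl).dropLast.map some)).zip
              ((y :: tl).zip ((((y :: tl).drop 1).map some) ++ [none]))).map pvMark) from rfl,
        ihy]
      rfl

lemma seqB_gSpec (seq : List String) : pvSeqB seq = gSpec false seq := by
  have h := zip_mark_gSpec seq none
  simpa [pvSeqB, PySem.List.slice_to_neg_one, PySem.List.slice_from_one, List.drop_one] using h

lemma seq_eq (seq : List String) : pvSeqA seq = pvSeqB seq := by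
  rw [seqA_gSpec, seqB_gSpec]

-- ===== VERDICT =====
theorem break_lines_spec : Claim_equal_break_lines := by
  intro asts _
  unfold Spec_break_lines break_lines break_lines_alt
  simp [seq_eq]
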